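-- pv_equiv track=rewrite | github.com/SOLEROM/2brain | src/query.py | parse_ask_response
-- ===== SOURCE A (Python) =====
-- from typing import Iterable, Optional
--
-- ASK_SECTIONS = ("Answer", "Candidate Additions", "Conflicts / Uncertainty", "Suggested Next Actions")
--
-- def parse_ask_response(text: str) -> dict:
--     """Split the Markdown reply on the four known section headers.
--
--     Missing sections default to "None" so the template can render consistently.
--     Tolerant to extra preamble or trailing text.
--     """
--     sections = {name: "None" for name in ASK_SECTIONS}
--     if not text:
--         return sections
--
--     # Tokenise by line so we can walk section boundaries.
--     lines = text.splitlines()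
--     current: Optional[str] = None
--     buffers: dict[str, list[str]] = {name: [] for name in ASK_SECTIONS}
--
--     def _match_heading(line: str) -> Optional[str]:
--         stripped = line.strip()
--         if not stripped.startswith("## "):
--             return None
--         heading = stripped[3:].strip().lower()
--         for name in ASK_SECTIONS:
--             if heading == name.lower():
--                 return name
--         # Accept common variants.
--         aliases = {
--             "conflicts": "Conflicts / Uncertainty",
--             "conflicts and uncertainty": "Conflicts / Uncertainty",
--             "uncertainty": "Conflicts / Uncertainty",
--             "next actions": "Suggested Next Actions",
--             "suggested actions": "Suggested Next Actions",
--         }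
--         return aliases.get(heading)
--
--     for line in lines:
--         match = _match_heading(line)
--         if match is not None:
--             current = match
--             continue
--         if current is None:
--             continue
--         buffers[current].append(line)
--
--     for name in ASK_SECTIONS:
--         body = "\n".join(buffers[name]).strip()
--         if body:
--             sections[name] = body
--     return sections
-- ===== SOURCE B (Python) =====
-- from typing import Optional
--
-- ASK_SECTIONS = ("Answer", "Candidate Additions", "Conflicts / Uncertainty", "Suggested Next Actions")
--
-- _ALIASES = {
--     "conflicts": "Conflicts / Uncertainty",
--     "conflicts and uncertainty": "Conflicts / Uncertainty",
--     "uncertainty": "Conflicts / Uncertainty",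
--     "next actions": "Suggested Next Actions",
--     "suggested actions": "Suggested Next Actions",
-- }
--
-- def _heading(line: str) -> Optional[str]:
--     stripped = line.strip()
--     if not stripped.startswith("## "):
--         return None
--     h = stripped[3:].strip().lower()
--     for name in ASK_SECTIONS:
--         if h == name.lower():
--             return name
--     return _ALIASES.get(h)
--
-- def _segments(lines):
--     """(name, body lines) for each recognised heading, in document order."""
--     segs = []
--     i, n = 0, len(lines)
--     while i < n:
--         name = _heading(lines[i])
--         if name is None:
--             i += 1          # line before any heading: preamble, skip
--             continue
--         j = i + 1
--         while j < n and _heading(lines[j]) is None: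
--             j += 1
--         segs.append((name, lines[i + 1:j]))
--         i = j
--     return segs
--
-- def parse_ask_response(text: str) -> dict:
--     segs = _segments(text.splitlines())
--
--     def render(name):
--         body = "\n".join(line for sec, block in segs for line in block if sec == name).strip()
--         return body if body else "None"
--
--     return {name: render(name) for name in ASK_SECTIONS}
-- ===== Notes on version B (the rewrite author's own statement) =====
-- stated objective: alternative
-- what changed: Replaces A's single stateful pass (a 'current section' register plus per-name buffer dict mutated line by line) with a two-phase decomposition: first cut the line list into heading-delimited (name, body-lines) segments, then render each of the four sections by concatenating its segments' lines, joining and stripping.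
import Mathlib
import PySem

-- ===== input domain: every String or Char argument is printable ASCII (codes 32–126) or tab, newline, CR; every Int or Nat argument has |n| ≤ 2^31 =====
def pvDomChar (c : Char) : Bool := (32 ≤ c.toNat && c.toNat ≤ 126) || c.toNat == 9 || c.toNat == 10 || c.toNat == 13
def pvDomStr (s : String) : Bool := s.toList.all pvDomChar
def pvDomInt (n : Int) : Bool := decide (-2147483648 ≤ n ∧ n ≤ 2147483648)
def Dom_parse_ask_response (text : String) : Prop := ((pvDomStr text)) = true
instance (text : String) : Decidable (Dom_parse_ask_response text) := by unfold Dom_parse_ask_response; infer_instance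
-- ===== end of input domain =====

-- B replaces A's stateful line loop (current-section register + per-name buffers dict)
-- by a two-phase decomposition: first cut the lines into heading-delimited segments,
-- then render each of the four sections from its segments; objective: alternative.

-- ===== PORT A =====
def askSections : List String :=
  ["Answer", "Candidate Additions", "Conflicts / Uncertainty", "Suggested Next Actions"]

def aliasesA : PySem.Dict String String := PySem.Dict.ofList
  [("conflicts", "Conflicts / Uncertainty"),
   ("conflicts and uncertainty", "Conflicts / Uncertainty"),
   ("uncertainty", "Conflicts / Uncertainty"),
   ("next actions", "Suggested Next Actions"),
   ("suggested actions", "Suggested Next Actions")]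

def matchHeadingA (line : String) : Option String :=
  let stripped := PySem.Str.strip line
  if !(PySem.Str.startswith stripped "## ") then none
  else
    let heading := PySem.Str.lower (PySem.Str.strip (PySem.Str.slice stripped (some 3) none))
    match askSections.find? (fun name => heading == PySem.Str.lower name) with
    | some name => some name
    | none => aliasesA.get? heading

def parse_ask_response (text : String) : List (String × String) :=
  let sections0 : PySem.Dict String String :=
    askSections.foldl (fun d n => d.insert n "None") PySem.Dict.empty
  if text == "" then sections0.items
  else
    let lines := PySem.Str.splitlines text
    let buffers0 : PySem.Dict String (List String) :=
      askSections.foldl (fun d n => d.insert n []) PySem.Dict.empty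
    -- buffers[current].append(line): current is always a key of buffers, so modify is exact
    let st := lines.foldl
      (fun (st : Option String × PySem.Dict String (List String)) line =>
        match matchHeadingA line with
        | some m => (some m, st.2)
        | none =>
          match st.1 with
          | none => st
          | some c => (some c, st.2.modify c [] (fun b => b ++ [line]))) (none, buffers0)
    let sections := askSections.foldl
      (fun d name =>
        let body := PySem.Str.strip (PySem.Str.join "\n" (st.2.getD name []))
        if body ≠ "" then d.insert name body else d) sections0
    sections.items

-- ===== PORT B =====
def matchHeadingB (line : String) : Option String :=
  let stripped := PySem.Str.strip line
  if !(PySem.Str.startswith stripped "## ") then none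
  else
    let heading := PySem.Str.lower (PySem.Str.strip (PySem.Str.slice stripped (some 3) none))
    match askSections.find? (fun name => heading == PySem.Str.lower name) with
    | some name => some name
    | none => aliasesA.get? heading

-- _segments: the outer while loop is the recursion; the inner while collecting
-- body lines up to the next heading is takeWhile/dropWhile
def segmentsB : List String → List (String × List String)
  | [] => []
  | l :: ls =>
    match matchHeadingB l with
    | none => segmentsB ls
    | some name =>
      (name, ls.takeWhile (fun x => (matchHeadingB x).isNone)) ::
        segmentsB (ls.dropWhile (fun x => (matchHeadingB x).isNone))
termination_by ls => ls.length
decreasing_by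
  · simp
  · have := (List.dropWhile_sublist (l := ls) (p := fun x => (matchHeadingB x).isNone)).length_le
    simp; omega

def parse_ask_response_alt (text : String) : List (String × String) :=
  let segs := segmentsB (PySem.Str.splitlines text)
  askSections.map (fun name =>
    let body := PySem.Str.strip (PySem.Str.join "\n"
      (segs.flatMap (fun p => if p.1 == name then p.2 else [])))
    (name, if body ≠ "" then body else "None"))

-- ===== PRECONDITION & SPEC =====
def Spec_parse_ask_response (text : String) (out : List (String × String)) : Prop := out = parse_ask_response_alt text
instance (text : String) (out : List (String × String)) : Decidable (Spec_parse_ask_response text out) := by unfold Spec_parse_ask_response; infer_instance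

-- ===== CLAIM (what is proved, stated in full; the proofs are below) =====
def Claim_equal_parse_ask_response : Prop := ∀ (text : String), Dom_parse_ask_response text → Spec_parse_ask_response text (parse_ask_response text)

-- ===== LEMMAS AND PROOFS =====

theorem headingB_eq : matchHeadingB = matchHeadingA := rfl

-- the lines A's loop appends to buffers[name], starting from state cur
def attrib (name : String) : List String → Option String → List String
  | [], _ => []
  | l :: ls, cur =>
    match matchHeadingA l with
    | some m => attrib name ls (some m)
    | none =>
      match cur with
      | none => attrib name ls none
      | some c => (if c = name then [l] else []) ++ attrib name ls (some c)

theorem loopA_getD (name : String) (ls : List String) :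
    ∀ (cur : Option String) (d : PySem.Dict String (List String)),
    (ls.foldl
      (fun (st : Option String × PySem.Dict String (List String)) line =>
        match matchHeadingA line with
        | some m => (some m, st.2)
        | none =>
          match st.1 with
          | none => st
          | some c => (some c, st.2.modify c [] (fun b => b ++ [line]))) (cur, d)).2.getD name []
      = d.getD name [] ++ attrib name ls cur := by
  induction ls with
  | nil => intro cur d; simp [attrib]
  | cons l ls ih =>
    intro cur d
    simp only [List.foldl_cons]
    cases hm : matchHeadingA l with
    | some m => simp [attrib, hm, ih]
    | none =>
      cases cur with
      | none => simp [attrib, hm, ih]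
      | some c =>
        simp only [attrib, hm, ih]
        rw [PySem.Dict.getD_modify]
        rcases eq_or_ne c name with hc | hc
        · subst hc; simp
        · simp [hc, Ne.symm hc]

theorem attrib_some (name : String) (ls : List String) : ∀ (m : String),
    attrib name ls (some m)
      = (if m = name then ls.takeWhile (fun x => (matchHeadingA x).isNone) else [])
        ++ attrib name (ls.dropWhile (fun x => (matchHeadingA x).isNone)) none := by
  induction ls with
  | nil => intro m; simp [attrib]
  | cons l ls ih =>
    intro m
    cases hm : matchHeadingA l with
    | some m' =>
      simp [attrib, hm]
    | none =>
      simp only [attrib, hm, List.takeWhile_cons, List.dropWhile_cons, Option.isNone_none,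
        if_true, ih]
      by_cases hmn : m = name <;> simp [hmn]

theorem attrib_eq_segments (name : String) : ∀ (n : Nat) (ls : List String), ls.length ≤ n →
    attrib name ls none
      = (segmentsB ls).flatMap (fun p => if p.1 == name then p.2 else []) := by
  intro n
  induction n with
  | zero =>
    intro ls h
    have : ls = [] := List.eq_nil_of_length_eq_zero (Nat.le_zero.mp h)
    subst this; simp [attrib, segmentsB]
  | succ n ih =>
    intro ls h
    cases ls with
    | nil => simp [attrib, segmentsB]
    | cons l ls =>
      cases hm : matchHeadingA l with
      | none =>
        rw [segmentsB, headingB_eq, hm]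
        simp only [attrib, hm]
        exact ih ls (by simpa using Nat.lt_succ_iff.mp (Nat.lt_of_lt_of_le (Nat.lt_succ_self _) h))
      | some m =>
        rw [segmentsB, headingB_eq, hm]
        simp only [attrib, hm, List.flatMap_cons]
        rw [attrib_some]
        have hlen : (ls.dropWhile (fun x => (matchHeadingA x).isNone)).length ≤ n := by
          have := (List.dropWhile_sublist (l := ls)
            (p := fun x => (matchHeadingA x).isNone)).length_le
          simp at h; omega
        rw [ih _ hlen]
        by_cases hmn : m = name
        · simp [hmn]
        · have : (m == name) = false := by simp [hmn]
          simp [hmn, this]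

theorem assembleA (f : String → String) :
    (askSections.foldl
      (fun d name => if f name ≠ "" then d.insert name (f name) else d)
      (askSections.foldl (fun d n => d.insert n "None") PySem.Dict.empty)).items
    = askSections.map (fun n => (n, if f n ≠ "" then f n else "None")) := by
  simp only [askSections, List.foldl_cons, List.foldl_nil, List.map_cons, List.map_nil]
  split_ifs <;> rfl

theorem buffers0_getD (name : String) :
    (askSections.foldl (fun d n => d.insert n ([] : List String)) PySem.Dict.empty).getD name []
      = [] := by
  simp only [askSections, List.foldl_cons, List.foldl_nil]
  rw [PySem.Dict.getD_insert, PySem.Dict.getD_insert, PySem.Dict.getD_insert,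
    PySem.Dict.getD_insert]
  split_ifs <;> simp [PySem.Dict.getD_empty]

-- ===== VERDICT (by name: the statement is the Claim_ definition above) =====
theorem parse_ask_response_spec : Claim_equal_parse_ask_response := by
  unfold Claim_equal_parse_ask_response Spec_parse_ask_response
  intro text _
  by_cases h : text = ""
  · subst h
    have h0 : PySem.Str.splitlines "" = ([] : List String) := by decide
    unfold parse_ask_response parse_ask_response_alt
    simp only [h0, segmentsB]
    decide
  · have hb : (text == "") = false := by simpa using h
    unfold parse_ask_response parse_ask_response_alt
    simp only [hb, Bool.false_eq_true, if_false]
    rw [assembleA]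
    apply List.map_congr_left
    intro name _
    have := loopA_getD name (PySem.Str.splitlines text) none
      (askSections.foldl (fun d n => d.insert n ([] : List String)) PySem.Dict.empty)
    rw [this, buffers0_getD,
      attrib_eq_segments name (PySem.Str.splitlines text).length _ le_rfl]
    simp
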